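-- pv_equiv track=rewrite | github.com/thesketh/advent-of-code-2021 | 9/solution.py | sandwich_iterator
-- ===== SOURCE A (Python) =====
-- from itertools import chain, tee
-- from typing import Dict, Iterable, Iterator, List, Optional, Set, Tuple, TypeVar
--
-- IterType = TypeVar("IterType")
--
-- def sandwich_iterator(
--     iterable: Iterable[IterType],
-- ) -> Iterator[Tuple[Optional[IterType], IterType, Optional[IterType]]]:
--     """
--     Iterate through an iterable, yielding a tuple containing the item before
--     (or `None`) the item, and the item after (or `None`).
--
--     """
--     lagging: Iterator[Optional[IterType]]
--     current: Iterator[IterType]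
--     leading: Iterator[Optional[IterType]]
--
--     lagging, current, leading = tee(iterable, 3)
--     lagging = chain([None], lagging)
--
--     try:
--         next(leading)
--     except StopIteration:
--         leading = iter([None])
--     else:
--         leading = chain(leading, [None])
--
--     for tup in zip(lagging, current, leading):
--         yield tup
-- ===== SOURCE B (Python) =====
-- def sandwich_iterator(iterable):
--     """Yield (prev, item, next) triples using explicit sliding-window state."""
--     it = iter(iterable)
--     try:
--         current = next(it)
--     except StopIteration:
--         return
--     prev = None
--     for nxt in it:
--         yield (prev, current, nxt)
--         prev = current
--         current = nxt
--     yield (prev, current, None)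
-- ===== Notes on version B (the rewrite author's own statement) =====
-- stated objective: idiomatic
-- what changed: Replaced the tee/chain/zip three-stream construction with a single-pass generator that keeps explicit prev/current sliding-window state and a lookahead loop.
import Mathlib
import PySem

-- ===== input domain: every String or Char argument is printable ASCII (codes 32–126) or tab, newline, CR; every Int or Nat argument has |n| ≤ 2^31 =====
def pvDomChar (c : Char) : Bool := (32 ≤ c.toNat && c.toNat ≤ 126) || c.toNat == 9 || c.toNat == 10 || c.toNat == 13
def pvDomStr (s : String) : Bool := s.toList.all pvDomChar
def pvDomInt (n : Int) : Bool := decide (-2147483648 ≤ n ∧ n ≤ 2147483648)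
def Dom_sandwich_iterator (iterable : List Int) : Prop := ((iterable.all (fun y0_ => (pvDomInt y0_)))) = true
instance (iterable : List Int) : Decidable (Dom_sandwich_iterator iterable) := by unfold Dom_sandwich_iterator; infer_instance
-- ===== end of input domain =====

-- ===== PORT A =====
-- A: tee the list into three streams: lagging (None-prefixed), current, leading (advanced one, None-suffixed), and zip them.
def sandwich_iterator (iterable : List Int) : List (Option Int × Int × Option Int) :=
  let lagging : List (Option Int) := none :: iterable.map some
  let leading : List (Option Int) :=
    match iterable with
    | [] => [none]
    | _ :: t => t.map some ++ [none]
  List.zip lagging (List.zip iterable leading)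

-- ===== PORT B =====
-- B: single pass with explicit prev/current state and a lookahead loop.
def sandwichGo (prev : Option Int) (current : Int) : List Int → List (Option Int × Int × Option Int)
  | [] => [(prev, current, none)]
  | nxt :: rest => (prev, current, some nxt) :: sandwichGo (some current) nxt rest

def sandwich_iterator_alt : List Int → List (Option Int × Int × Option Int)
  | [] => []
  | x :: rest => sandwichGo none x rest

-- ===== PRECONDITION & SPEC =====
def Spec_sandwich_iterator (iterable : List Int) (out : List (Option Int × Int × Option Int)) : Prop := out = sandwich_iterator_alt iterable
instance (iterable : List Int) (out : List (Option Int × Int × Option Int)) : Decidable (Spec_sandwich_iterator iterable out) := by unfold Spec_sandwich_iterator; infer_instance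

-- ===== CLAIM (what is proved, stated in full; the proofs are below) =====
def Claim_equal_sandwich_iterator : Prop := ∀ (iterable : List Int), Dom_sandwich_iterator iterable → Spec_sandwich_iterator iterable (sandwich_iterator iterable)

-- ===== LEMMAS AND PROOFS =====
theorem zip3_eq_go (rest : List Int) : ∀ (prev : Option Int) (x : Int),
    List.zip (prev :: List.map some (x :: rest)) (List.zip (x :: rest) (List.map some rest ++ [none])) =
      sandwichGo prev x rest := by
  induction rest with
  | nil => intro prev x; simp [sandwichGo]
  | cons nxt rest' ih =>
      intro prev x
      simp only [List.map_cons, List.cons_append, List.zip_cons_cons, sandwichGo]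
      exact congrArg _ (ih (some x) nxt)

-- ===== VERDICT (by name: the statement is the Claim_ definition above) =====
theorem sandwich_iterator_spec : Claim_equal_sandwich_iterator := by
  intro iterable _
  unfold Spec_sandwich_iterator sandwich_iterator sandwich_iterator_alt
  cases iterable with
  | nil => rfl
  | cons x rest => exact zip3_eq_go rest none x
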